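-- pv_equiv track=rewrite | github.com/npmvlKP/IATB-02Apr26 | tests/integration/test_phase_n_stress_test.py | _generate_symbols
-- ===== SOURCE A (Python) =====
-- def _generate_symbols(count: int) -> list[str]:
--     prefixes = ["RELIANCE", "TCS", "INFY", "HDFCBANK", "ICICIBANK", "SBIN"]
--     symbols: list[str] = []
--     for i in range(count):
--         prefix = prefixes[i % len(prefixes)]
--         if i < len(prefixes):
--             symbols.append(prefix)
--         else:
--             symbols.append(f"{prefix}_{i}")
--     return symbols
-- ===== SOURCE B (Python) =====
-- def _generate_symbols(count: int) -> list[str]: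
--     prefixes = ["RELIANCE", "TCS", "INFY", "HDFCBANK", "ICICIBANK", "SBIN"]
--     symbols = list(prefixes[:max(count, 0)])
--     for base in range(6, count, 6):
--         block = [f"{p}_{base + j}" for j, p in enumerate(prefixes)]
--         symbols += block[:count - base]
--     return symbols
-- ===== Notes on version B (the rewrite author's own statement) =====
-- stated objective: alternative
-- what changed: Replaces A's single index loop with a per-index modulo and an in-loop branch by block generation: a clamped slice gives the bare-prefix head, then each block of six suffixed names is built by enumerating the prefix list at a block base (no modulo, no branch) and truncated to the remaining count by slicing.
import Mathlib
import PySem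

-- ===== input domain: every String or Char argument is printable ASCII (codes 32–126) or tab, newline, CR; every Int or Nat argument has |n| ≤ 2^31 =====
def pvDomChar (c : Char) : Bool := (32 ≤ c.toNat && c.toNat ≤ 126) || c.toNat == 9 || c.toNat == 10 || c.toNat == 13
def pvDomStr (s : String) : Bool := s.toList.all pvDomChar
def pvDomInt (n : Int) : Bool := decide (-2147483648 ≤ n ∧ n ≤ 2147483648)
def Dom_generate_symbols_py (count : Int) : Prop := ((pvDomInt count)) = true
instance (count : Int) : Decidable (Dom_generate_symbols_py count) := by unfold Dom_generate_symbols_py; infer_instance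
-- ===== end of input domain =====

-- B replaces A's index loop with an in-loop branch (and its per-index modulo) by block generation:
-- the bare-prefix head, then whole blocks of six suffixed names built from enumerate(prefixes) per
-- block base and truncated by slicing (objective: alternative).

-- ===== PORT A =====
def generate_symbols_py (count : Int) : List String :=
  let prefixes : List String := ["RELIANCE", "TCS", "INFY", "HDFCBANK", "ICICIBANK", "SBIN"]
  let symbols : List String :=
    (PySem.List.pyRange 0 count 1).foldl (fun symbols i =>
      let pfx := PySem.List.pyGetD prefixes (PySem.Int.mod i (PySem.List.len prefixes)) ""
      if i < (PySem.List.len prefixes) then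
        symbols ++ [pfx]
      else
        symbols ++ [pfx ++ "_" ++ PySem.Int.toStr i]) []
  symbols

-- ===== PORT B =====
def generate_symbols_py_alt (count : Int) : List String :=
  let prefixes : List String := ["RELIANCE", "TCS", "INFY", "HDFCBANK", "ICICIBANK", "SBIN"]
  let symbols : List String := PySem.List.slice prefixes none (some (max count 0))
  (PySem.List.pyRange 6 count 6).foldl (fun symbols base =>
    let block := (PySem.List.enumerate prefixes).map
      (fun jp => jp.2 ++ "_" ++ PySem.Int.toStr (base + jp.1))
    symbols ++ PySem.List.slice block none (some (count - base))) symbols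

-- ===== PRECONDITION & SPEC =====
def Spec_generate_symbols_py (count : Int) (out : List String) : Prop := out = generate_symbols_py_alt count
instance (count : Int) (out : List String) : Decidable (Spec_generate_symbols_py count out) := by unfold Spec_generate_symbols_py; infer_instance

-- ===== CLAIM (what is proved, stated in full; the proofs are below) =====
def Claim_equal_generate_symbols_py : Prop := ∀ (count : Int), Dom_generate_symbols_py count → Spec_generate_symbols_py count (generate_symbols_py count)

-- ===== LEMMAS AND PROOFS =====

def pvPrefixes : List String := ["RELIANCE", "TCS", "INFY", "HDFCBANK", "ICICIBANK", "SBIN"]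

def pvF (i : Int) : String :=
  let pfx := PySem.List.pyGetD pvPrefixes (PySem.Int.mod i (PySem.List.len pvPrefixes)) ""
  if i < (PySem.List.len pvPrefixes) then pfx else pfx ++ "_" ++ PySem.Int.toStr i

def pvG (i : Int) : String :=
  PySem.List.pyGetD pvPrefixes (PySem.Int.mod i 6) "" ++ "_" ++ PySem.Int.toStr i

def pvStep (count : Int) (symbols : List String) (base : Int) : List String :=
  symbols ++ PySem.List.slice
    ((PySem.List.enumerate pvPrefixes).map
      (fun jp => jp.2 ++ "_" ++ PySem.Int.toStr (base + jp.1)))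
    none (some (count - base))

theorem pvA_eq_map (count : Int) :
    generate_symbols_py count = (PySem.List.pyRange 0 count 1).map pvF := by
  unfold generate_symbols_py
  have h : ∀ (acc : List String) (i : Int),
      (let pfx := PySem.List.pyGetD pvPrefixes (PySem.Int.mod i (PySem.List.len pvPrefixes)) ""
       if i < (PySem.List.len pvPrefixes) then
         acc ++ [pfx]
       else
         acc ++ [pfx ++ "_" ++ PySem.Int.toStr i]) = acc ++ [pvF i] := by
    intro acc i
    simp only [pvF, pvPrefixes]
    split <;> rfl
  simp only [pvPrefixes] at h
  simp only [h]
  exact PySem.List.foldl_append_singleton_eq_map _ _ _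

theorem pvB_eq (count : Int) :
    generate_symbols_py_alt count
      = (PySem.List.pyRange 6 count 6).foldl (pvStep count)
          (PySem.List.slice pvPrefixes none (some (max count 0))) := rfl

theorem pvRange6_nil (a b : Int) (h : b ≤ a) : PySem.List.pyRange a b 6 = [] := by
  rw [PySem.List.pyRange_of_pos _ _ (by norm_num : (0:Int) < 6), if_neg (by omega)]
  rfl

theorem pvRange6_cons (a b : Int) (h : a < b) :
    PySem.List.pyRange a b 6 = a :: PySem.List.pyRange (a + 6) b 6 := by
  rw [PySem.List.pyRange_of_pos _ _ (by norm_num : (0:Int) < 6),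
      PySem.List.pyRange_of_pos _ _ (by norm_num : (0:Int) < 6), if_pos h]
  by_cases h2 : a + 6 < b
  · rw [if_pos h2]
    have hn : ((b - a + 6 - 1) / 6).toNat = ((b - (a + 6) + 6 - 1) / 6).toNat + 1 := by omega
    rw [hn, List.range_succ_eq_map, List.map_cons, List.map_map]
    congr 1
    · norm_num
    · apply List.map_congr_left
      intro k _
      simp [Function.comp]
      ring
  · rw [if_neg h2]
    have hn : ((b - a + 6 - 1) / 6).toNat = 1 := by omega
    rw [hn]
    norm_num [List.range_succ]

theorem pvTakeRange (a b : Int) (k : Nat) :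
    List.take k (PySem.List.pyRange a b 1) = PySem.List.pyRange a (min (a + k) b) 1 := by
  rw [PySem.List.pyRange_one a b, PySem.List.pyRange_one a (min (a + ↑k) b)]
  have hmin : min k (b - a).toNat = (min (a + (k:Int)) b - a).toNat := by omega
  rw [← List.map_take, List.take_range, hmin]

theorem pvBlockmap (base : Int) (hb : 6 ∣ base) (_h0 : 0 ≤ base) :
    (PySem.List.enumerate pvPrefixes).map (fun jp => jp.2 ++ "_" ++ PySem.Int.toStr (base + jp.1))
      = (PySem.List.pyRange base (base + 6) 1).map pvG := by
  have m0 : base % 6 = 0 := by omega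
  have m1 : (base + 1) % 6 = 1 := by omega
  have m2 : (base + 2) % 6 = 2 := by omega
  have m3 : (base + 3) % 6 = 3 := by omega
  have m4 : (base + 4) % 6 = 4 := by omega
  have m5 : (base + 5) % 6 = 5 := by omega
  rw [PySem.List.pyRange_one]
  norm_num [List.range_succ, pvPrefixes, PySem.List.enumerate_cons, PySem.List.enumerate_nil,
    pvG, m0, m1, m2, m3, m4, m5, PySem.List.pyGetD]
  norm_num [show Int.toNat 6 = 6 from rfl, List.range_succ, Function.comp, pvG,
    m0, m1, m2, m3, m4, m5, pvPrefixes, PySem.List.pyGetD, PySem.List.pyGet?]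
  decide

theorem pvSliceBlock (base count : Int) (hb : 6 ∣ base) (h0 : 0 ≤ base) (h : base ≤ count) :
    PySem.List.slice
        ((PySem.List.enumerate pvPrefixes).map
          (fun jp => jp.2 ++ "_" ++ PySem.Int.toStr (base + jp.1)))
        none (some (count - base))
      = (PySem.List.pyRange base (min (base + 6) count) 1).map pvG := by
  rw [pvBlockmap base hb h0, PySem.List.slice_to _ (by omega : (0:Int) ≤ count - base),
      ← List.map_take, pvTakeRange]
  congr 2
  omega

theorem pvL (n : Nat) : ∀ (base count : Int) (init : List String),
    6 ∣ base → 0 ≤ base → (count - base).toNat ≤ n →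
    (PySem.List.pyRange base count 6).foldl (pvStep count) init
      = init ++ (PySem.List.pyRange base count 1).map pvG := by
  induction n with
  | zero =>
    intro base count init hb h0 hn
    have hle : count ≤ base := by omega
    rw [pvRange6_nil _ _ hle, PySem.List.pyRange_one_eq_nil hle]
    simp
  | succ n ih =>
    intro base count init hb h0 hn
    by_cases h : base < count
    · rw [pvRange6_cons _ _ h, List.foldl_cons]
      have hstep : pvStep count init base
          = init ++ (PySem.List.pyRange base (min (base + 6) count) 1).map pvG := by
        unfold pvStep
        rw [pvSliceBlock base count hb h0 (by omega)]
      by_cases h2 : base + 6 ≤ count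
      · rw [hstep, ih (base + 6) count _ (by omega) (by omega) (by omega),
            min_eq_left h2,
            PySem.List.pyRange_one_append base (base + 6) count (by omega) h2,
            List.map_append, List.append_assoc]
      · rw [pvRange6_nil _ _ (by omega), List.foldl_nil, hstep, min_eq_right (by omega)]
    · rw [pvRange6_nil _ _ (by omega), PySem.List.pyRange_one_eq_nil (by omega)]
      simp

theorem pvMain (count : Int) : generate_symbols_py count = generate_symbols_py_alt count := by
  rw [pvA_eq_map, pvB_eq]
  by_cases hle : count ≤ 6
  · rw [pvRange6_nil _ _ hle, List.foldl_nil]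
    by_cases hpos : 0 < count
    · interval_cases count <;> decide
    · have h0 : count ≤ 0 := by omega
      rw [PySem.List.pyRange_one_eq_nil h0,
          show max count 0 = 0 by omega,
          PySem.List.slice_to _ (by omega : (0:Int) ≤ 0)]
      rfl
  · have h6 : (6:Int) < count := by omega
    rw [pvL ((count - 6).toNat) 6 count _ (by norm_num) (by norm_num) (le_refl _),
        show max count 0 = count by omega,
        PySem.List.slice_to _ (by omega : (0:Int) ≤ count),
        List.take_of_length_le (by simp [pvPrefixes]; omega),
        PySem.List.pyRange_one_append 0 6 count (by omega) (by omega),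
        List.map_append]
    have hhead : (PySem.List.pyRange 0 6 1).map pvF = pvPrefixes := by decide
    rw [hhead]
    congr 1
    apply List.map_congr_left
    intro i hi
    rw [PySem.List.mem_pyRange_one] at hi
    simp only [pvF, pvG]
    rw [if_neg (by simp [pvPrefixes, PySem.List.len]; omega)]
    simp [pvPrefixes, PySem.List.len]

-- ===== VERDICT (by name: the statement is the Claim_ definition above) =====
theorem generate_symbols_py_spec : Claim_equal_generate_symbols_py := by
  intro count _
  unfold Spec_generate_symbols_py
  exact pvMain count
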